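-- pv_equiv track=rewrite | github.com/MaHuanAAA/lukit | lukit/methods/semantic_graph_utils.py | deduplicate_sampled_texts
-- ===== SOURCE A (Python) =====
-- from typing import Any, Dict, List, Tuple
--
-- def normalize_exact_match_text(text: str) -> str:
--     return str(text).strip().lower()
--
-- def deduplicate_sampled_texts(texts: List[str]) -> Tuple[List[str], List[int], List[int]]:
--     normalized_texts: List[str] = []
--     mapping: List[int] = []
--     first_indices: List[int] = []
--     seen: Dict[str, int] = {}
--
--     for idx, text in enumerate(texts):
--         normalized = normalize_exact_match_text(text)
--         mapped = seen.get(normalized)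
--         if mapped is None:
--             mapped = len(normalized_texts)
--             seen[normalized] = mapped
--             normalized_texts.append(normalized)
--             first_indices.append(idx)
--         mapping.append(mapped)
--     return normalized_texts, mapping, first_indices
-- ===== SOURCE B (Python) =====
-- from typing import List, Tuple
--
-- def normalize_exact_match_text(text: str) -> str:
--     return str(text).strip().lower()
--
-- def deduplicate_sampled_texts(texts: List[str]) -> Tuple[List[str], List[int], List[int]]:
--     normalized = [normalize_exact_match_text(t) for t in texts]
--     first_indices = [i for i, n in enumerate(normalized) if n not in normalized[:i]]
--     normalized_texts = [normalized[i] for i in first_indices]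
--     mapping = [normalized_texts.index(n) for n in normalized]
--     return normalized_texts, mapping, first_indices
-- ===== Notes on version B (the rewrite author's own statement) =====
-- stated objective: simpler
-- what changed: A's single stateful loop with a seen-dict is replaced by four stateless comprehensions: first_indices is the positions whose normalized text does not occur in the preceding prefix (brute-force prefix membership instead of a hash map), normalized_texts indexes into the normalized list by those positions, and mapping is a list.index lookup against the finished deduplicated list.
import Mathlib
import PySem

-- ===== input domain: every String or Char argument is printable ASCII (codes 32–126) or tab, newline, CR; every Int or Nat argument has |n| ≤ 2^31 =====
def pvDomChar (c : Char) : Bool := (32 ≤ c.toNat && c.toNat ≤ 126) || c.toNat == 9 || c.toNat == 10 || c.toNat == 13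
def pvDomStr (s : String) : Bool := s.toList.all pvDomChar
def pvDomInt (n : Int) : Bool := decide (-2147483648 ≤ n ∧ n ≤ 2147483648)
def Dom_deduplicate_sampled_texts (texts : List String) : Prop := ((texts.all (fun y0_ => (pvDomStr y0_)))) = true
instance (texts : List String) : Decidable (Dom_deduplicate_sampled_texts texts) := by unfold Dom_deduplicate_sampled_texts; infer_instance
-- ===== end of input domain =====

-- B replaces A's single stateful loop with a seen-dict by four stateless comprehensions
-- (prefix-membership tests and list.index); objective: simpler, not faster.

-- module helper shared by both versions: str(text).strip().lower()
def normalize_exact_match_text (text : String) : String :=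
  PySem.Str.lower (PySem.Str.strip text)

-- ===== PORT A =====
-- A's for-loop over enumerate(texts), carrying all four accumulators
def dedupLoopA (ts : List String) (idx : Int) (nts : List String) (mp fi : List Int)
    (seen : PySem.Dict String Int) : List String × List Int × List Int :=
  match ts with
  | [] => (nts, mp, fi)
  | t :: rest =>
    match seen.get? (normalize_exact_match_text t) with
    | some m => dedupLoopA rest (idx + 1) nts (mp ++ [m]) fi seen
    | none =>
        dedupLoopA rest (idx + 1) (nts ++ [normalize_exact_match_text t])
          (mp ++ [(nts.length : Int)]) (fi ++ [idx])
          (seen.insert (normalize_exact_match_text t) (nts.length : Int))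

def deduplicate_sampled_texts (texts : List String) : List String × List Int × List Int :=
  dedupLoopA texts 0 [] [] [] PySem.Dict.empty

-- ===== PORT B =====
def deduplicate_sampled_texts_alt (texts : List String) : List String × List Int × List Int :=
  let normalized := texts.map normalize_exact_match_text
  -- [i for i, n in enumerate(normalized) if n not in normalized[:i]]
  let first_indices := ((PySem.List.enumerate normalized 0).filter
      (fun p => !((PySem.List.slice normalized none (some p.1)).contains p.2))).map (·.1)
  -- normalized[i]: every i in first_indices is a valid index, so the default is never used (exact)
  let normalized_texts := first_indices.map (fun i => PySem.List.pyGetD normalized i "")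
  -- normalized_texts.index(n): n is always present, so ValueError never occurs (exact)
  let mapping := normalized.map (fun n =>
      ((PySem.List.index? normalized_texts n).map Int.ofNat).getD 0)
  (normalized_texts, mapping, first_indices)

-- ===== PRECONDITION & SPEC =====
def Spec_deduplicate_sampled_texts (texts : List String) (out : List String × List Int × List Int) : Prop := out = deduplicate_sampled_texts_alt texts
instance (texts : List String) (out : List String × List Int × List Int) : Decidable (Spec_deduplicate_sampled_texts texts out) := by unfold Spec_deduplicate_sampled_texts; infer_instance

-- ===== CLAIM (what is proved, stated in full; the proofs are below) =====
def Claim_equal_deduplicate_sampled_texts : Prop := ∀ (texts : List String), Dom_deduplicate_sampled_texts texts → Spec_deduplicate_sampled_texts texts (deduplicate_sampled_texts texts)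

-- ===== LEMMAS AND PROOFS =====

-- canonical normal forms both programs are reduced to: walking the normalized rest R
-- with the already-seen normalized prefix P
def specNew (P R : List String) : List String :=
  match R with
  | [] => []
  | n :: r => if n ∈ P then specNew (P ++ [n]) r else n :: specNew (P ++ [n]) r

def specFi (P R : List String) : List Int :=
  match R with
  | [] => []
  | n :: r => if n ∈ P then specFi (P ++ [n]) r
              else (P.length : Int) :: specFi (P ++ [n]) r

-- dedup of a snoc
lemma dedup_snoc (P : List String) (n : String) :
    PySem.List.dedup (P ++ [n]) =
      if n ∈ P then PySem.List.dedup P else PySem.List.dedup P ++ [n] := by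
  have h : (PySem.List.dedup P).contains n = true ↔ n ∈ P := by
    rw [List.contains_iff_mem, PySem.List.mem_dedup]
  simp only [PySem.List.dedup, PySem.Set.ofList, List.foldl_append, List.foldl_cons,
    List.foldl_nil, PySem.Set.add]
  split_ifs with h1 h2 h2 <;> first
    | rfl
    | exact absurd (h.mp h1) h2
    | exact absurd (h.mpr h2) h1

-- A's loop, characterised against the already-processed normalized prefix P
lemma loopA_eq (ts : List String) : ∀ (P : List String) (mp fi : List Int)
    (seen : PySem.Dict String Int),
    (∀ n, seen.get? n = (PySem.List.index? (PySem.List.dedup P) n).map Int.ofNat) →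
    dedupLoopA ts (P.length : Int) (PySem.List.dedup P) mp fi seen =
      (PySem.List.dedup P ++ specNew P (ts.map normalize_exact_match_text),
       mp ++ (ts.map normalize_exact_match_text).map (fun n =>
         ((PySem.List.index?
             (PySem.List.dedup P ++ specNew P (ts.map normalize_exact_match_text)) n).map
            Int.ofNat).getD 0),
       fi ++ specFi P (ts.map normalize_exact_match_text)) := by
  induction ts with
  | nil => intro P mp fi seen _; simp [dedupLoopA, specNew, specFi]
  | cons t rest ih =>
    intro P mp fi seen hseen
    set n := normalize_exact_match_text t with hn
    by_cases hmem : n ∈ P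
    · -- seen before: dict hit, prefix unchanged
      have hdd : n ∈ PySem.List.dedup P := (PySem.List.mem_dedup _ _).mpr hmem
      obtain ⟨k, hk⟩ := Option.isSome_iff_exists.mp
        ((PySem.List.index?_isSome_iff _ _).mpr hdd)
      have hget : seen.get? n = some (Int.ofNat k) := by rw [hseen, hk]; rfl
      have hP' : PySem.List.dedup (P ++ [n]) = PySem.List.dedup P := by
        rw [dedup_snoc]; simp [hmem]
      have hlen : ((P ++ [n]).length : Int) = (P.length : Int) + 1 := by
        simp
      have := ih (P ++ [n]) (mp ++ [Int.ofNat k]) fi seen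
        (by intro m; rw [hseen, hP'])
      rw [hP', hlen] at this
      have hidx : PySem.List.index?
          (PySem.List.dedup P ++ specNew (P ++ [n]) (rest.map normalize_exact_match_text)) n
          = some k := by
        rw [PySem.List.index?_append_of_mem _ hdd, hk]
      simp only [dedupLoopA, ← hn, hget, List.map_cons, specNew, specFi, if_pos hmem]
      rw [this, hidx]
      simp
    · -- new: dict miss, prefix grows
      have hdd : n ∉ PySem.List.dedup P := fun h => hmem ((PySem.List.mem_dedup _ _).mp h)
      have hnone : PySem.List.index? (PySem.List.dedup P) n = none :=
        (PySem.List.index?_eq_none_iff _ _).mpr hdd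
      have hget : seen.get? n = none := by rw [hseen, hnone]; rfl
      have hP' : PySem.List.dedup (P ++ [n]) = PySem.List.dedup P ++ [n] := by
        rw [dedup_snoc]; simp [hmem]
      have hlen : ((P ++ [n]).length : Int) = (P.length : Int) + 1 := by
        simp
      have hseen' : ∀ m, (seen.insert n ((PySem.List.dedup P).length : Int)).get? m =
          (PySem.List.index? (PySem.List.dedup (P ++ [n])) m).map Int.ofNat := by
        intro m
        rw [hP']
        by_cases hm : m = n
        · subst hm
          rw [PySem.Dict.get?_insert_self,
            PySem.List.index?_append_singleton_self _ _ hdd]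
          rfl
        · rw [PySem.Dict.get?_insert_of_ne _ _ hm, hseen]
          by_cases hmP : m ∈ PySem.List.dedup P
          · rw [PySem.List.index?_append_of_mem _ hmP]
          · rw [(PySem.List.index?_eq_none_iff _ _).mpr hmP,
              (PySem.List.index?_eq_none_iff _ _).mpr (by
                simp only [List.mem_append, List.mem_singleton]
                rintro (h | h) <;> [exact hmP h; exact hm h])]
      have := ih (P ++ [n]) (mp ++ [((PySem.List.dedup P).length : Int)])
        (fi ++ [(P.length : Int)]) (seen.insert n ((PySem.List.dedup P).length : Int)) hseen'
      rw [hP', hlen] at this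
      have hidx : PySem.List.index?
          (PySem.List.dedup P ++ (n :: specNew (P ++ [n]) (rest.map normalize_exact_match_text))) n
          = some (PySem.List.dedup P).length := by
        rw [PySem.List.index?_eq_some_iff]
        exact ⟨PySem.List.dedup P, _, rfl, rfl, hdd⟩
      simp only [dedupLoopA, ← hn, hget, List.map_cons, specNew, specFi, if_neg hmem]
      rw [this]
      simp only [List.append_assoc, List.singleton_append]
      rw [hidx]
      simp

-- B's first_indices comprehension equals specFi
lemma filter_enum_eq_specFi (R : List String) : ∀ (P F : List String), F = P ++ R →
    (((PySem.List.enumerate R (P.length : Int)).filter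
        (fun p => !((PySem.List.slice F none (some p.1)).contains p.2))).map (·.1))
      = specFi P R := by
  induction R with
  | nil => intro P F _; simp [PySem.List.enumerate, specFi]
  | cons n r ih =>
    intro P F hF
    have hslice : PySem.List.slice F none (some ((P.length : Nat) : Int)) = P := by
      rw [PySem.List.slice_to_natCast, hF, List.take_left]
    have hc : (List.contains P n = true) ↔ n ∈ P := List.contains_iff_mem
    have htail := ih (P ++ [n]) F (by rw [hF]; simp)
    have hlen : ((P ++ [n]).length : Int) = (P.length : Int) + 1 := by
      simp
    rw [hlen] at htail
    by_cases hmem : n ∈ P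
    · simp only [PySem.List.enumerate_cons, List.filter_cons, hslice,
        Bool.not_eq_eq_eq_not, Bool.not_true, specFi, if_pos hmem]
      rw [if_neg (by simp [hmem])]
      exact htail
    · simp only [PySem.List.enumerate_cons, List.filter_cons, hslice, specFi, if_neg hmem]
      rw [if_pos (by simp [hmem])]
      simp only [List.map_cons]
      rw [htail]

-- indexing the normalized list by specFi recovers specNew
lemma map_get_specFi (R : List String) : ∀ (P F : List String), F = P ++ R →
    (specFi P R).map (fun i => PySem.List.pyGetD F i "") = specNew P R := by
  induction R with
  | nil => intro P F _; simp [specFi, specNew]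
  | cons n r ih =>
    intro P F hF
    have htail := ih (P ++ [n]) F (by rw [hF]; simp)
    by_cases hmem : n ∈ P
    · simpa [specFi, specNew, hmem] using htail
    · have hget : PySem.List.pyGetD F ((P.length : Nat) : Int) "" = n := by
        rw [PySem.List.pyGetD_natCast, hF]
        simp [List.getD]
      simp only [specFi, specNew, if_neg hmem, List.map_cons, hget]
      rw [htail]

-- ===== VERDICT (by name: the statement is the Claim_ definition above) =====
theorem deduplicate_sampled_texts_spec : Claim_equal_deduplicate_sampled_texts := by
  intro texts _
  unfold Spec_deduplicate_sampled_texts deduplicate_sampled_texts deduplicate_sampled_texts_alt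
  have hA := loopA_eq texts [] [] [] PySem.Dict.empty
    (by intro n; simp [PySem.Dict.get?, PySem.Dict.empty, PySem.List.index?])
  have hdnil : PySem.List.dedup ([] : List String) = [] := rfl
  rw [hdnil] at hA
  simp only [List.length_nil, Nat.cast_zero, List.nil_append] at hA
  have hfi := filter_enum_eq_specFi (texts.map normalize_exact_match_text) []
    (texts.map normalize_exact_match_text) (by simp)
  have hnt := map_get_specFi (texts.map normalize_exact_match_text) []
    (texts.map normalize_exact_match_text) (by simp)
  simp only [List.length_nil, Nat.cast_zero] at hfi hnt
  rw [hA]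
  simp only [hfi, hnt]
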